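-- pv_equiv track=rewrite | github.com/faizaladin/BipedGaitGA | LowerHalfGa.py | convert_to_ctrl
-- ===== SOURCE A (Python) =====
-- def decode(bit_string):
--     # Convert the two-bit string to a number
--     if bit_string == "00":
--         return 0
--     elif bit_string == "01":
--         return 1
--     elif bit_string == "10":
--         return 0
--     elif bit_string == "11":
--         return -1
--
-- def convert_to_ctrl(bit_string, num_actuators):
--     # Calculate the length of each encoded value
--     value_length = 2  # Assuming each actuator value is encoded in 8 bits
--
--     # Initialize an empty control matrix
--     ctrl_matrix = []
--
--     # Iterate through the bit string to decode values
--     for i in range(0, len(bit_string), num_actuators * value_length):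
--         # Extract a chunk of bits for each step
--         step_bits = bit_string[i:i + num_actuators * value_length]
--
--         # Initialize a list to store decoded values for the current step
--         step_values = []
--
--         # Iterate through the chunk to decode values for each actuator
--         for j in range(0, len(step_bits), value_length):
--             # Extract the bits for the current actuator's value
--             value_bits = step_bits[j:j + value_length]
--             # Decode the value and append it to the list
--             step_values.append(decode(value_bits))
--
--         # Append the list of decoded values for the current step to the control matrix
--         ctrl_matrix.append(step_values)
--
--     return ctrl_matrix
-- ===== SOURCE B (Python) =====
-- def decode(bit_string):
--     # Convert the two-bit string to a number
--     if bit_string == "00":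
--         return 0
--     elif bit_string == "01":
--         return 1
--     elif bit_string == "10":
--         return 0
--     elif bit_string == "11":
--         return -1
--
-- def convert_to_ctrl(bit_string, num_actuators):
--     # Recursive decomposition: peel one step (2*num_actuators bits) off the
--     # front of the string per row; no index arithmetic over the whole string.
--     if num_actuators <= 0 or bit_string == "":
--         return []
--     step = 2 * num_actuators
--     step_bits, rest = bit_string[:step], bit_string[step:]
--     row = [decode(step_bits[j:j + 2]) for j in range(0, len(step_bits), 2)]
--     return [row] + convert_to_ctrl(rest, num_actuators)
-- ===== Notes on version B (the rewrite author's own statement) =====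
-- stated objective: alternative
-- what changed: A's indexed nested for-loops over ranges are replaced by a recursive decomposition that peels one step (2*num_actuators bits) off the front of the string per row, decoding that prefix with a single comprehension.
-- outside the precondition, e.g. on convert_to_ctrl('0a', 1): A returns [[None]], B returns [[None]]; on convert_to_ctrl('011', 1): A returns [[1], [None]], B returns [[1], [None]]; on convert_to_ctrl('01', 0): A raises ValueError, B returns []
import Mathlib
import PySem

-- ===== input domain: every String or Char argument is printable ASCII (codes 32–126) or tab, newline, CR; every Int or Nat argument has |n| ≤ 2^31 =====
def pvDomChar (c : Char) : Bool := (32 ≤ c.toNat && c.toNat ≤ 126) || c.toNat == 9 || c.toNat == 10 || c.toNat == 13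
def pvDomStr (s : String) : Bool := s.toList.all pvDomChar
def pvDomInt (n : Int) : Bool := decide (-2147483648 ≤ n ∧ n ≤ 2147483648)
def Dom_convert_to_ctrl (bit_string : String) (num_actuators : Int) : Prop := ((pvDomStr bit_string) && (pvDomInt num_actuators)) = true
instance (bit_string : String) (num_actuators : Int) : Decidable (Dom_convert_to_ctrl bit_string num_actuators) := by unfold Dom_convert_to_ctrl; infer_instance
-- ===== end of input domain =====

-- B replaces A's indexed nested range-loops by a recursive decomposition that peels one
-- step (2*num_actuators bits) off the front of the string per row.

-- ===== PORT A =====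
-- helper 'decode' of the module: returns none exactly where Python's decode returns None
def decode (bit_string : String) : Option Int :=
  if bit_string = "00" then some 0
  else if bit_string = "01" then some 1
  else if bit_string = "10" then some 0
  else if bit_string = "11" then some (-1)
  else none

-- literal port of A; '.getD 0' stands for Python appending decode's result: inside
-- Pre_ decode never returns none, outside Pre_ Python's list would contain None
def convert_to_ctrl (bit_string : String) (num_actuators : Int) : List (List Int) :=
  let value_length : Int := 2
  (PySem.List.pyRange 0 (PySem.Str.len bit_string) (num_actuators * value_length)).foldl
    (fun ctrl_matrix i =>
      let step_bits := PySem.Str.slice bit_string (some i) (some (i + num_actuators * value_length))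
      let step_values := (PySem.List.pyRange 0 (PySem.Str.len step_bits) value_length).foldl
        (fun step_values j =>
          step_values ++ [(decode (PySem.Str.slice step_bits (some j) (some (j + value_length)))).getD 0]) []
      ctrl_matrix ++ [step_values]) []

-- ===== PORT B =====
-- Source B's own copy of the helper 'decode'
def decode_alt (bit_string : String) : Option Int :=
  if bit_string = "00" then some 0
  else if bit_string = "01" then some 1
  else if bit_string = "10" then some 0
  else if bit_string = "11" then some (-1)
  else none

-- port of Source B: recursion peeling 2*num_actuators characters per row ('.getD 0' as in A's port)
def convert_to_ctrl_alt (bit_string : String) (num_actuators : Int) : List (List Int) :=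
  if num_actuators ≤ 0 ∨ bit_string = "" then []
  else
    let step := 2 * num_actuators
    let step_bits := PySem.Str.slice bit_string none (some step)
    let rest := PySem.Str.slice bit_string (some step) none
    let row := (PySem.List.pyRange 0 (PySem.Str.len step_bits) 2).map
      (fun j => (decode_alt (PySem.Str.slice step_bits (some j) (some (j + 2)))).getD 0)
    [row] ++ convert_to_ctrl_alt rest num_actuators
termination_by bit_string.toList.length
decreasing_by
  rename_i h
  push_neg at h
  have hne : bit_string.toList ≠ [] := by
    intro hnil
    exact h.2 (String.toList_inj.mp (by simpa using hnil))
  have hlen : (PySem.Str.slice bit_string (some (2 * num_actuators)) none).toList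
      = bit_string.toList.drop (2 * num_actuators).toNat := by
    simp only [PySem.Str.toList_slice, PySem.Chars.slice_eq_listSlice]
    rw [PySem.List.slice_from _ (by omega)]
  rw [hlen]
  have h1 : 0 < bit_string.toList.length := List.length_pos_of_ne_nil hne
  have h2 : 0 < (2 * num_actuators).toNat := by omega
  simp only [List.length_drop]
  omega

-- ===== PRECONDITION & SPEC =====
-- Pre_ excludes num_actuators = 0, where A raises ValueError (range step 0), and,
-- for positive num_actuators, strings that are not even-length over '0'/'1': there decode
-- returns None, so A's rows contain None — not values of the declared type List (List Int)
-- (B produces the identical rows with None there).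
def Pre_convert_to_ctrl (bit_string : String) (num_actuators : Int) : Prop :=
  num_actuators ≠ 0 ∧
    (0 < num_actuators →
      bit_string.toList.all (fun c => c == '0' || c == '1') = true ∧
        bit_string.toList.length % 2 = 0)
instance (bit_string : String) (num_actuators : Int) : Decidable (Pre_convert_to_ctrl bit_string num_actuators) := by
  unfold Pre_convert_to_ctrl; infer_instance

def pvWitness_convert_to_ctrl : String × Int := ("01101100", 2)

def Spec_convert_to_ctrl (bit_string : String) (num_actuators : Int) (out : List (List Int)) : Prop := out = convert_to_ctrl_alt bit_string num_actuators
instance (bit_string : String) (num_actuators : Int) (out : List (List Int)) : Decidable (Spec_convert_to_ctrl bit_string num_actuators out) := by unfold Spec_convert_to_ctrl; infer_instance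

-- ===== CLAIM (what is proved, stated in full; the proofs are below) =====
def Claim_equal_convert_to_ctrl : Prop := ∀ (bit_string : String) (num_actuators : Int), Dom_convert_to_ctrl bit_string num_actuators → Pre_convert_to_ctrl bit_string num_actuators → Spec_convert_to_ctrl bit_string num_actuators (convert_to_ctrl bit_string num_actuators)

-- ===== LEMMAS AND PROOFS =====

-- decode on the character-list side
def decodeC (cs : List Char) : Option Int :=
  if cs = ['0', '0'] then some 0
  else if cs = ['0', '1'] then some 1
  else if cs = ['1', '0'] then some 0
  else if cs = ['1', '1'] then some (-1)
  else none

theorem decode_eq_decodeC (s : String) : decode s = decodeC s.toList := by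
  have h : ∀ t : String, (s = t) ↔ (s.toList = t.toList) := fun t => String.toList_inj.symm
  simp only [decode, decodeC, h]
  rfl

theorem decode_alt_eq_decodeC (s : String) : decode_alt s = decodeC s.toList := by
  have h : ∀ t : String, (s = t) ↔ (s.toList = t.toList) := fun t => String.toList_inj.symm
  simp only [decode_alt, decodeC, h]
  rfl

-- the chunks of a list, of size d (intended for 1 ≤ d)
def chunks {α : Type} (d : Nat) : List α → List (List α)
  | [] => []
  | c :: cs => ((c :: cs).take d) :: chunks d (cs.drop (d - 1))
termination_by l => l.length
decreasing_by simp

theorem chunks_cons {α : Type} (d : Nat) (hd : 0 < d) (c : α) (cs : List α) :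
    chunks d (c :: cs) = ((c :: cs).take d) :: chunks d ((c :: cs).drop d) := by
  have h : (c :: cs).drop d = cs.drop (d - 1) := by
    obtain ⟨e, rfl⟩ := Nat.exists_eq_add_of_lt hd
    simp
  rw [chunks, h]

theorem pyRange_pos_cons (a b s : Int) (hs : 0 < s) (h : a < b) :
    PySem.List.pyRange a b s = a :: PySem.List.pyRange (a + s) b s := by
  rw [PySem.List.pyRange_of_pos _ _ hs, PySem.List.pyRange_of_pos _ _ hs]
  have hc : (if a < b then ((b - a + s - 1) / s).toNat else 0) =
      (if a + s < b then ((b - (a + s) + s - 1) / s).toNat else 0) + 1 := by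
    rw [if_pos h]
    by_cases h2 : a + s < b
    · rw [if_pos h2]
      have he : b - a + s - 1 = (b - (a + s) + s - 1) + 1 * s := by ring
      rw [he, Int.add_mul_ediv_right _ _ (by omega)]
      have hnn : (0 : Int) ≤ (b - (a + s) + s - 1) / s :=
        Int.ediv_nonneg (by omega) (le_of_lt hs)
      omega
    · rw [if_neg h2]
      have he : b - a + s - 1 = (b - a - 1) + 1 * s := by ring
      rw [he, Int.add_mul_ediv_right _ _ (by omega)]
      rw [Int.ediv_eq_zero_of_lt (by omega) (by omega)]
      rfl
  rw [hc, List.range_succ_eq_map]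
  simp only [List.map_cons, List.map_map, Nat.cast_zero, mul_zero, add_zero, List.cons.injEq,
    true_and]
  apply List.map_congr_left
  intro k _
  simp only [Function.comp_apply]
  push_cast
  ring

theorem pyRange_shift (a b s : Int) (hs : 0 < s) :
    PySem.List.pyRange (a + s) b s = (PySem.List.pyRange a (b - s) s).map (· + s) := by
  rw [PySem.List.pyRange_of_pos _ _ hs, PySem.List.pyRange_of_pos _ _ hs]
  by_cases h : a + s < b
  · rw [if_pos h, if_pos (by omega : a < b - s)]
    have harg : b - (a + s) + s - 1 = b - s - a + s - 1 := by ring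
    rw [harg, List.map_map]
    apply List.map_congr_left
    intro k _
    simp only [Function.comp_apply]
    ring
  · rw [if_neg h, if_neg (by omega : ¬ a < b - s)]
    simp

theorem pyRange_neg_of_nonneg_stop (b s : Int) (hs : s < 0) (hb : 0 ≤ b) :
    PySem.List.pyRange 0 b s = [] := by
  unfold PySem.List.pyRange
  rw [if_neg (by omega)]
  rw [if_neg (by omega), if_neg (by omega)]
  rfl

theorem pyRange_empty_of_nonpos (b s : Int) (hb : b ≤ 0) (hs : 0 < s) :
    PySem.List.pyRange 0 b s = [] := by
  rw [PySem.List.pyRange_of_pos _ _ hs, if_neg (by omega)]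
  rfl

theorem slice_shift {α : Type} (cs : List α) (s i : Int) (hs : 0 < s) (hi : 0 ≤ i) :
    PySem.List.slice cs (some (i + s)) (some (i + s + s))
      = PySem.List.slice (cs.drop s.toNat) (some i) (some (i + s)) := by
  rw [PySem.List.slice_toNat _ (by omega) (by omega),
    PySem.List.slice_toNat _ (by omega) (by omega), List.drop_drop]
  have e1 : (i + s + s).toNat - (i + s).toNat = s.toNat := by omega
  have e2 : (i + s).toNat - i.toNat = s.toNat := by omega
  have e3 : (i + s).toNat = s.toNat + i.toNat := by omega
  rw [e1, e2, e3]

-- a chunking fold: 'for i in range(0, len(cs), s): out.append(g(cs[i:i+s]))'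
theorem foldl_pyRange_slice {α β : Type} (g : List α → β) (s : Int) (hs : 0 < s)
    (cs : List α) (init : List β) :
    (PySem.List.pyRange 0 (cs.length : Int) s).foldl
        (fun acc i => acc ++ [g (PySem.List.slice cs (some i) (some (i + s)))]) init
      = init ++ (chunks s.toNat cs).map g := by
  induction hn : cs.length using Nat.strong_induction_on generalizing cs init with
  | _ n ih =>
    cases cs with
    | nil =>
      subst hn
      rw [show ((([] : List α).length : Int)) = 0 by simp,
        pyRange_empty_of_nonpos 0 s le_rfl hs]
      simp [chunks]
    | cons c cs' =>
      subst hn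
      have hlen : (0 : Int) < ((c :: cs').length : Int) := by
        simp
      rw [pyRange_pos_cons 0 _ s hs hlen, List.foldl_cons]
      rw [zero_add]
      have hsh : PySem.List.pyRange s ((c :: cs').length : Int) s
          = (PySem.List.pyRange 0 (((c :: cs').length : Int) - s) s).map (· + s) := by
        have h := pyRange_shift 0 ((c :: cs').length : Int) s hs
        rw [zero_add] at h
        exact h
      rw [hsh, List.foldl_map]
      set rest := (c :: cs').drop s.toNat with hrest
      have hrlen : (rest.length : Int) = max ((c :: cs').length - s) 0 := by
        simp [hrest]
        omega
      have hrange : PySem.List.pyRange 0 (((c :: cs').length : Int) - s) s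
          = PySem.List.pyRange 0 (rest.length : Int) s := by
        by_cases hle : ((c :: cs').length : Int) - s ≤ 0
        · rw [pyRange_empty_of_nonpos _ s hle hs,
            pyRange_empty_of_nonpos _ s (by omega) hs]
        · congr 1
          omega
      rw [hrange]
      have hbody : ∀ (acc : List β) (i : Int),
          i ∈ PySem.List.pyRange 0 (rest.length : Int) s →
          acc ++ [g (PySem.List.slice (c :: cs') (some (i + s)) (some (i + s + s)))]
            = acc ++ [g (PySem.List.slice rest (some i) (some (i + s)))] := by
        intro acc i hi
        have hi0 : 0 ≤ i := ((PySem.List.mem_pyRange_iff_of_pos hs i).mp hi).1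
        rw [hrest, slice_shift (c :: cs') s i hs hi0]
      rw [PySem.List.foldl_congr_mem _ _ _ _ hbody]
      have hslice0 : PySem.List.slice (c :: cs') (some 0) (some s)
          = (c :: cs').take s.toNat := by
        rw [PySem.List.slice_toNat _ le_rfl (by omega)]
        simp
      rw [hslice0]
      rw [ih rest.length (by simp [hrest]; omega) rest _ rfl]
      rw [chunks_cons s.toNat (by omega) c cs']
      simp [hrest]

-- A's inner row loop decodes the 2-chunks of a step slice
theorem row_eq (step_bits : String) :
    (PySem.List.pyRange 0 (PySem.Str.len step_bits) 2).foldl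
        (fun step_values j =>
          step_values ++ [(decode (PySem.Str.slice step_bits (some j) (some (j + 2)))).getD 0]) []
      = (chunks 2 step_bits.toList).map (fun ch => (decodeC ch).getD 0) := by
  have hbody : ∀ (acc : List Int) (j : Int),
      j ∈ PySem.List.pyRange 0 ((step_bits.toList.length : Nat) : Int) 2 →
      acc ++ [(decode (PySem.Str.slice step_bits (some j) (some (j + 2)))).getD 0]
        = acc ++ [(fun ch => (decodeC ch).getD 0)
            (PySem.List.slice step_bits.toList (some j) (some (j + 2)))] := by
    intro acc j _
    rw [decode_eq_decodeC, PySem.Str.toList_slice]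
    rfl
  rw [PySem.Str.len_eq, PySem.List.foldl_congr_mem _ _ _ _ hbody,
    foldl_pyRange_slice (fun ch => (decodeC ch).getD 0) 2 (by omega) step_bits.toList []]
  rfl

-- B's comprehension row equals the same 2-chunk decoding
theorem rowB_eq (sb : String) :
    (PySem.List.pyRange 0 (PySem.Str.len sb) 2).map
        (fun j => (decode_alt (PySem.Str.slice sb (some j) (some (j + 2)))).getD 0)
      = (chunks 2 sb.toList).map (fun ch => (decodeC ch).getD 0) := by
  have hfold := PySem.List.foldl_append_singleton_eq_map
    (l := PySem.List.pyRange 0 (PySem.Str.len sb) 2)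
    (f := fun j => (decode_alt (PySem.Str.slice sb (some j) (some (j + 2)))).getD 0)
    (acc := [])
  rw [List.nil_append] at hfold
  rw [← hfold]
  have hbody : ∀ (acc : List Int) (j : Int),
      j ∈ PySem.List.pyRange 0 ((sb.toList.length : Nat) : Int) 2 →
      acc ++ [(decode_alt (PySem.Str.slice sb (some j) (some (j + 2)))).getD 0]
        = acc ++ [(fun ch => (decodeC ch).getD 0)
            (PySem.List.slice sb.toList (some j) (some (j + 2)))] := by
    intro acc j _
    rw [decode_alt_eq_decodeC, PySem.Str.toList_slice]
    rfl
  rw [PySem.Str.len_eq, PySem.List.foldl_congr_mem _ _ _ _ hbody,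
    foldl_pyRange_slice (fun ch => (decodeC ch).getD 0) 2 (by omega) sb.toList []]
  rfl

-- characterisation of A for positive num_actuators: chunk by 2n, decode each chunk's pairs
theorem A_eq_chunks (bit_string : String) (num_actuators : Int) (hna : 0 < num_actuators) :
    convert_to_ctrl bit_string num_actuators
      = (chunks (num_actuators * 2).toNat bit_string.toList).map
          (fun ch => (chunks 2 ch).map (fun c => (decodeC c).getD 0)) := by
  unfold convert_to_ctrl
  simp only []
  have hbodyA : ∀ (acc : List (List Int)) (i : Int),
      i ∈ PySem.List.pyRange 0 (PySem.Str.len bit_string) (num_actuators * 2) →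
      acc ++ [(PySem.List.pyRange 0
          (PySem.Str.len (PySem.Str.slice bit_string (some i) (some (i + num_actuators * 2)))) 2).foldl
          (fun step_values j => step_values ++
            [(decode (PySem.Str.slice
              (PySem.Str.slice bit_string (some i) (some (i + num_actuators * 2)))
              (some j) (some (j + 2)))).getD 0]) []]
        = acc ++ [(fun ch => (chunks 2 ch).map (fun c => (decodeC c).getD 0))
            (PySem.List.slice bit_string.toList (some i) (some (i + num_actuators * 2)))] := by
    intro acc i _
    rw [row_eq]
    rw [PySem.Str.toList_slice]
    rfl
  rw [PySem.List.foldl_congr_mem _ _ _ _ hbodyA]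
  rw [PySem.Str.len_eq]
  rw [foldl_pyRange_slice (fun ch => (chunks 2 ch).map (fun c => (decodeC c).getD 0))
    (num_actuators * 2) (by omega) bit_string.toList []]
  rw [List.nil_append]

-- characterisation of B for positive num_actuators, by induction on the string length
theorem B_eq_chunks (num_actuators : Int) (hna : 0 < num_actuators) (bit_string : String) :
    convert_to_ctrl_alt bit_string num_actuators
      = (chunks (num_actuators * 2).toNat bit_string.toList).map
          (fun ch => (chunks 2 ch).map (fun c => (decodeC c).getD 0)) := by
  induction hn : bit_string.toList.length using Nat.strong_induction_on generalizing bit_string with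
  | _ n ih =>
    rw [convert_to_ctrl_alt]
    by_cases hs : bit_string = ""
    · rw [if_pos (Or.inr hs)]
      subst hs
      simp [chunks]
    · rw [if_neg (by push_neg; exact ⟨by omega, hs⟩)]
      simp only []
      have htl : bit_string.toList ≠ [] := by
        intro hnil
        exact hs (String.toList_inj.mp (by simpa using hnil))
      obtain ⟨c, cs, hcons⟩ := List.exists_cons_of_ne_nil htl
      have hstep : (PySem.Str.slice bit_string none (some (2 * num_actuators))).toList
          = bit_string.toList.take (2 * num_actuators).toNat := by
        simp only [PySem.Str.toList_slice, PySem.Chars.slice_eq_listSlice]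
        rw [PySem.List.slice_to _ (by omega)]
      have hrest : (PySem.Str.slice bit_string (some (2 * num_actuators)) none).toList
          = bit_string.toList.drop (2 * num_actuators).toNat := by
        simp only [PySem.Str.toList_slice, PySem.Chars.slice_eq_listSlice]
        rw [PySem.List.slice_from _ (by omega)]
      rw [rowB_eq, hstep]
      have hrlen : (PySem.Str.slice bit_string (some (2 * num_actuators)) none).toList.length < n := by
        rw [hrest]
        subst hn
        have h1 : 0 < bit_string.toList.length := List.length_pos_of_ne_nil htl
        simp only [List.length_drop]
        omega
      rw [ih _ hrlen _ rfl, hrest]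
      have hmul : (2 * num_actuators).toNat = (num_actuators * 2).toNat := by omega
      rw [hmul, hcons, chunks_cons (num_actuators * 2).toNat (by omega) c cs, List.map_cons]
      rfl

-- ===== VERDICT (by name: the statement is the Claim_ definition above) =====
theorem convert_to_ctrl_spec : Claim_equal_convert_to_ctrl := by
  intro bit_string num_actuators _ hpre
  unfold Spec_convert_to_ctrl
  rcases lt_trichotomy num_actuators 0 with h | h | h
  · -- both return []: A's range has a negative step, B's guard fires
    unfold convert_to_ctrl
    rw [convert_to_ctrl_alt, if_pos (Or.inl (by omega))]
    simp only []
    rw [pyRange_neg_of_nonneg_stop _ (num_actuators * 2) (by omega)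
        (by rw [PySem.Str.len_eq]; omega)]
    rfl
  · exact absurd h hpre.1
  · rw [A_eq_chunks bit_string num_actuators h, B_eq_chunks num_actuators h bit_string]
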